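-- pv_equiv track=rewrite | github.com/caplane/AWS-Citate-Genie-Version | formatters/base.py | _format_initials_with_spacing
-- ===== SOURCE A (Python) =====
-- def _format_initials_with_spacing(name: str) -> str:
--     """
--     Add spacing between initials for proper formatting.
--
--     Examples:
--     - "E.M." → "E. M."
--     - "E.M.C." → "E. M. C."
--     - "Eric" → "Eric" (unchanged)
--     - "E. M." → "E. M." (unchanged)
--
--     Args:
--         name: Given name or initials
--
--     Returns:
--         Properly spaced name/initials
--     """
--     if not name:
--         return ""
--
--     # Check if it looks like initials (short, has periods, mostly caps)
--     cleaned = name.replace(".", "").replace(" ", "")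
--
--     # If it's a full name (longer than 3 chars, no periods originally, or mixed case)
--     if len(cleaned) > 3 and '.' not in name:
--         return name
--
--     # If already has spaces after periods, it's properly formatted
--     if '. ' in name:
--         return name
--
--     # Add spaces after periods: "E.M." → "E. M."
--     result = ""
--     for i, char in enumerate(name):
--         result += char
--         if char == '.' and i < len(name) - 1 and name[i + 1] != ' ':
--             result += ' '
--
--     return result.strip()
-- ===== SOURCE B (Python) =====
-- def _format_initials_with_spacing(name: str) -> str:
--     if not name:
--         return ""
--
--     cleaned = name.replace(".", "").replace(" ", "")
--
--     if len(cleaned) > 3 and '.' not in name: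
--         return name
--
--     if '. ' in name:
--         return name
--
--     # Tokenize on periods and rejoin with period-plus-space; strip drops the
--     # trailing space a final period produces.
--     return '. '.join(name.split('.')).strip()
-- ===== Notes on version B (the rewrite author's own statement) =====
-- stated objective: idiomatic
-- what changed: The char-by-char loop that appends a space after each non-final period is replaced by a tokenize-rejoin: split the name on periods, join the segments with period-plus-space, and strip the trailing space a final period produces; the three guard checks are kept.
import Mathlib
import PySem

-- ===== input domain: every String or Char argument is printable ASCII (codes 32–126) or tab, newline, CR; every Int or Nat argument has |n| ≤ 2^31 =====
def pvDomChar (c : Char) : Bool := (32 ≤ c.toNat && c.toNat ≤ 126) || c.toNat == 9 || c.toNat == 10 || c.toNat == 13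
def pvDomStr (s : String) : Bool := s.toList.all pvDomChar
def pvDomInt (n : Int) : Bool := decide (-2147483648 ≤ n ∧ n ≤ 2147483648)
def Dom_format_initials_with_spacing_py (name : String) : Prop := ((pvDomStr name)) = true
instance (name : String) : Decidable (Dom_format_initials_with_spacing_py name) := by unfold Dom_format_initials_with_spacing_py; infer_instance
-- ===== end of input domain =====

-- B replaces A's char-by-char space-inserting loop with split-on-periods / rejoin-with-period-plus-space / strip (idiomatic; guards unchanged).

-- ===== PORT A =====
-- the body of A's 'for i, char in enumerate(name)' loop; name[i+1] is ported with
-- pyGetD (the default is never read: the 'i < len(name) - 1' test guards the access, as in Python)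
def pvStepA (full : List Char) (r : List Char) (p : Int × Char) : List Char :=
  let r' := r ++ [p.2]
  if p.2 = '.' ∧ p.1 < (full.length : Int) - 1 ∧ PySem.List.pyGetD full (p.1 + 1) ' ' ≠ ' '
  then r' ++ [' '] else r'

def format_initials_with_spacing_py (name : String) : String :=
  if name = "" then ""
  else
    let cleaned := PySem.Str.replace (PySem.Str.replace name "." "") " " ""
    if 3 < PySem.Str.len cleaned ∧ PySem.Str.isIn "." name = false then name
    else if PySem.Str.isIn ". " name = true then name
    else
      let result := (PySem.List.enumerate name.toList 0).foldl (pvStepA name.toList) []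
      PySem.Str.strip (String.ofList result)

-- ===== PORT B =====
def format_initials_with_spacing_py_alt (name : String) : String :=
  if name = "" then ""
  else
    let cleaned := PySem.Str.replace (PySem.Str.replace name "." "") " " ""
    if 3 < PySem.Str.len cleaned ∧ PySem.Str.isIn "." name = false then name
    else if PySem.Str.isIn ". " name = true then name
    else PySem.Str.strip
      (PySem.Str.join ". " ((PySem.Chars.splitOn name.toList ['.']).map String.ofList))

-- ===== PRECONDITION & SPEC =====
def Spec_format_initials_with_spacing_py (name : String) (out : String) : Prop := out = format_initials_with_spacing_py_alt name
instance (name : String) (out : String) : Decidable (Spec_format_initials_with_spacing_py name out) := by unfold Spec_format_initials_with_spacing_py; infer_instance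

-- ===== CLAIM (what is proved, stated in full; the proofs are below) =====
def Claim_equal_format_initials_with_spacing_py : Prop := ∀ (name : String), Dom_format_initials_with_spacing_py name → Spec_format_initials_with_spacing_py name (format_initials_with_spacing_py name)

-- ===== LEMMAS AND PROOFS =====

-- head/tail of name.split('.') as one clean structural recursion (proof-only helper)
def pvSplit1 : List Char → List Char × List (List Char)
  | [] => ([], [])
  | c :: rest =>
    let p := pvSplit1 rest
    if c = '.' then ([], p.1 :: p.2) else (c :: p.1, p.2)

-- the string A's loop builds (proof-only helper)
def pvLoopIns : List Char → List Char
  | [] => []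
  | c :: rest =>
    c :: (if c = '.' ∧ rest ≠ [] ∧ rest.head? ≠ some ' ' then ' ' :: pvLoopIns rest else pvLoopIns rest)

theorem pvToList_ofList (l : List Char) : (String.ofList l).toList = l := by simp

theorem pvGo_eq (fuel : Nat) (l cur : List Char) (acc : List (List Char)) (h : l.length < fuel) :
    PySem.Chars.splitOn.go ['.'] fuel l cur acc =
      acc.reverse ++ (cur.reverse ++ (pvSplit1 l).1) :: (pvSplit1 l).2 := by
  induction fuel generalizing l cur acc with
  | zero => omega
  | succ f ih =>
    cases l with
    | nil => simp [PySem.Chars.splitOn.go, pvSplit1]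
    | cons c rest =>
      have hlen : rest.length < f := by
        simp only [List.length_cons] at h
        omega
      rw [PySem.Chars.splitOn.go]
      by_cases hc : c = '.'
      · subst hc
        have hp : (['.'] : List Char).isPrefixOf ('.' :: rest) = true := by
          simp [List.isPrefixOf]
        simp only [hp, if_pos]
        have hd : List.drop (['.'] : List Char).length ('.' :: rest) = rest := rfl
        rw [hd, ih rest [] (cur.reverse :: acc) hlen]
        simp [pvSplit1]
      · have hbeq : (('.' : Char) == c) = false := beq_eq_false_iff_ne.mpr (fun e => hc e.symm)
        have hp : (['.'] : List Char).isPrefixOf (c :: rest) = false := by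
          simp [List.isPrefixOf, hbeq]
        simp only [hp, Bool.false_eq_true, if_neg, not_false_iff]
        rw [ih rest (c :: cur) acc hlen]
        simp [pvSplit1, hc]

theorem pvSplitOn_eq (l : List Char) :
    PySem.Chars.splitOn l ['.'] = (pvSplit1 l).1 :: (pvSplit1 l).2 := by
  unfold PySem.Chars.splitOn
  rw [pvGo_eq (l.length + 1) l [] [] (by omega)]
  simp

theorem pvLoop_eq (pre l acc : List Char) :
    (PySem.List.enumerate l (pre.length : Int)).foldl (pvStepA (pre ++ l)) acc
      = acc ++ pvLoopIns l := by
  induction l generalizing pre acc with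
  | nil => simp [PySem.List.enumerate_nil, pvLoopIns]
  | cons x rest ih =>
    rw [PySem.List.enumerate_cons, List.foldl_cons]
    have hfull : pre ++ x :: rest = (pre ++ [x]) ++ rest := by simp
    have hstart : ((pre.length : Int) + 1) = (((pre ++ [x]).length : Nat) : Int) := by
      simp
    have hstep : pvStepA (pre ++ x :: rest) acc ((pre.length : Int), x)
        = acc ++ [x] ++ (if x = '.' ∧ rest ≠ [] ∧ rest.head? ≠ some ' ' then [' '] else []) := by
      simp only [pvStepA]
      cases rest with
      | nil =>
        have hc1 : ¬ (x = '.' ∧ (pre.length : Int) < (((pre ++ [x]).length : Nat) : Int) - 1 ∧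
            PySem.List.pyGetD (pre ++ [x]) ((pre.length : Int) + 1) ' ' ≠ ' ') := by
          rintro ⟨-, h2, -⟩
          simp only [List.length_append, List.length_cons, List.length_nil] at h2
          push_cast at h2
          omega
        have hc2 : ¬ (x = '.' ∧ ([] : List Char) ≠ [] ∧ ([] : List Char).head? ≠ some ' ') := by
          rintro ⟨-, h2, -⟩
          exact h2 rfl
        rw [if_neg hc1, if_neg hc2]
        simp
      | cons y t =>
        have hget : PySem.List.pyGetD (pre ++ x :: y :: t) ((pre.length : Int) + 1) ' ' = y := by
          have hcast : ((pre.length : Int) + 1) = (((pre.length + 1 : Nat)) : Int) := by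
            push_cast
            ring
          rw [hcast, PySem.List.pyGetD_natCast, List.getD_eq_getElem?_getD,
            List.getElem?_append_right (by omega)]
          simp
        have hlt : (pre.length : Int) < (((pre ++ x :: y :: t).length : Nat) : Int) - 1 := by
          simp only [List.length_append, List.length_cons]
          push_cast
          try omega
        by_cases hx : x = '.'
        · by_cases hy : y = ' '
          · rw [if_neg (by rintro ⟨-, -, h3⟩; rw [hget] at h3; exact h3 hy),
              if_neg (by rintro ⟨-, -, h3⟩; exact h3 (by simp [hy]))]
            simp
          · rw [if_pos (show x = '.' ∧ (pre.length : Int) < (((pre ++ x :: y :: t).length : Nat) : Int) - 1 ∧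
                  PySem.List.pyGetD (pre ++ x :: y :: t) ((pre.length : Int) + 1) ' ' ≠ ' ' from
                ⟨hx, hlt, by rw [hget]; simpa using hy⟩),
              if_pos (show x = '.' ∧ (y :: t) ≠ [] ∧ (y :: t).head? ≠ some ' ' from
                ⟨hx, List.cons_ne_nil y t, by simpa using hy⟩)]
        · rw [if_neg (by rintro ⟨h1, -, -⟩; exact hx h1),
            if_neg (by rintro ⟨h1, -, -⟩; exact hx h1)]
          simp
    rw [hstep, hfull, hstart, ih (pre ++ [x])]
    by_cases hC : x = '.' ∧ rest ≠ [] ∧ rest.head? ≠ some ' '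
    · rw [if_pos hC]
      simp only [pvLoopIns]
      rw [if_pos hC]
      simp
    · rw [if_neg hC]
      simp only [pvLoopIns]
      rw [if_neg hC]
      simp

theorem pvJoin_head (sep s : List Char) (c : Char) (ss : List (List Char)) :
    PySem.Chars.join sep ((c :: s) :: ss) = c :: PySem.Chars.join sep (s :: ss) := by
  cases ss with
  | nil => simp [PySem.Chars.join_singleton]
  | cons y ys =>
    rw [PySem.Chars.join_cons_cons, PySem.Chars.join_cons_cons]
    simp

theorem pvJoin_split (l : List Char) (h : ¬ ['.', ' '] <:+: l) :
    PySem.Chars.join ['.', ' '] ((pvSplit1 l).1 :: (pvSplit1 l).2) =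
      pvLoopIns l ++ (if l.getLast? = some '.' then [' '] else []) := by
  induction l with
  | nil => decide
  | cons c rest ih =>
    have hrest : ¬ ['.', ' '] <:+: rest := fun hi =>
      h (hi.trans (List.suffix_cons c rest).isInfix)
    by_cases hc : c = '.'
    · subst hc
      cases rest with
      | nil => decide
      | cons y t =>
        have hy : y ≠ ' ' := by
          rintro rfl
          exact h (List.IsPrefix.isInfix ⟨t, rfl⟩)
        have hsplit : pvSplit1 ('.' :: y :: t) = ([], (pvSplit1 (y :: t)).1 :: (pvSplit1 (y :: t)).2) := by
          simp [pvSplit1]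
        rw [hsplit]
        rw [PySem.Chars.join_cons_cons]
        rw [ih hrest]
        have hloop : pvLoopIns ('.' :: y :: t) = '.' :: ' ' :: pvLoopIns (y :: t) := by
          simp only [pvLoopIns, true_and]
          rw [if_pos (show (y :: t) ≠ [] ∧ (y :: t).head? ≠ some ' ' from
            ⟨List.cons_ne_nil y t, by simpa using hy⟩)]
        rw [hloop]
        simp [List.getLast?_cons_cons]
    · have hsplit : pvSplit1 (c :: rest) = (c :: (pvSplit1 rest).1, (pvSplit1 rest).2) := by
        simp [pvSplit1, hc]
      rw [hsplit, pvJoin_head, ih hrest]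
      have hloop : pvLoopIns (c :: rest) = c :: pvLoopIns rest := by
        simp only [pvLoopIns]
        rw [if_neg (by rintro ⟨h1, -, -⟩; exact hc h1)]
      rw [hloop]
      cases rest with
      | nil => simp [pvLoopIns, hc]
      | cons y t => simp [List.getLast?_cons_cons]

theorem pvRstrip_append_space (y : List Char) :
    PySem.Chars.rstrip (y ++ [' ']) = PySem.Chars.rstrip y := by
  unfold PySem.Chars.rstrip
  rw [List.reverse_append]
  simp [List.dropWhile_cons_of_pos, PySem.Chars.isspace]

theorem pvStrip_append_space (x : List Char) :
    PySem.Chars.strip (x ++ [' ']) = PySem.Chars.strip x := by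
  unfold PySem.Chars.strip PySem.Chars.lstrip
  rw [List.dropWhile_append]
  by_cases he : (List.dropWhile PySem.Chars.isspace x).isEmpty = true
  · rw [if_pos he]
    rw [List.isEmpty_iff] at he
    rw [he]
    simp [PySem.Chars.rstrip, List.dropWhile, PySem.Chars.isspace]
  · rw [if_neg he]
    exact pvRstrip_append_space _

-- ===== VERDICT (by name: the statement is the Claim_ definition above) =====
set_option maxHeartbeats 1000000 in
theorem format_initials_with_spacing_py_spec : Claim_equal_format_initials_with_spacing_py := by
  intro name _
  unfold Spec_format_initials_with_spacing_py
  simp only [format_initials_with_spacing_py, format_initials_with_spacing_py_alt]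
  split_ifs with h1 h2 h3
  · rfl
  · rfl
  · rfl
  · -- final branch: A's loop result vs B's split/join, both stripped
    have hnods : ¬ ['.', ' '] <:+: name.toList := by
      have hb : PySem.Str.isIn ". " name = false := by
        cases hb : PySem.Str.isIn ". " name with
        | false => rfl
        | true => exact absurd hb h3
      have hb' : PySem.Chars.isIn ['.', ' '] name.toList = false := by
        simpa [PySem.Str.isIn] using hb
      exact (PySem.Chars.isIn_eq_false_iff _ _).mp hb'
    have hloop := pvLoop_eq [] name.toList []
    simp only [List.nil_append, Nat.cast_zero, List.length_nil] at hloop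
    rw [hloop, pvSplitOn_eq]
    simp only [PySem.Str.strip, PySem.Str.join, List.map_map]
    refine congrArg String.ofList ?_
    simp only [pvToList_ofList]
    have hmap : (((pvSplit1 name.toList).1 :: (pvSplit1 name.toList).2).map
        (String.toList ∘ String.ofList)) = (pvSplit1 name.toList).1 :: (pvSplit1 name.toList).2 := by
      rw [show String.toList ∘ String.ofList = id from funext pvToList_ofList, List.map_id]
    rw [hmap, show (". " : String).toList = ['.', ' '] from rfl,
      pvJoin_split name.toList hnods]
    by_cases hlast : name.toList.getLast? = some '.'
    · rw [if_pos hlast, pvStrip_append_space]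
    · rw [if_neg hlast]
      simp
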